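-- pv_equiv track=rewrite | github.com/qja1998/SSAFY_algorithm_study | BOJ/Silver/19638. 센티와 마법의 뿅망치/jyh.py | giant_hammer
-- ===== SOURCE A (Python) =====
-- import heapq
--
-- def giant_hammer(N, tall, T, li):
--     # 최대 힙을 만들기 위해 거인의 키를 음수로 저장
--     max_heap = [-h for h in li]
--     # 거인의 키를 저장한 리스트를 힙으로 변환
--     heapq.heapify(max_heap)
--     used_hammer = 0  # 마법의 뿅망치를 사용한 횟수를 저장하는 변수
--
--     # 마법의 뿅망치를 최대 T번 사용할 수 있으므로 T번 반복
--     for _ in range(T):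
--         # 현재 가장 키가 큰 거인을 양수로 힙에서 꺼냄
--         tallest = -heapq.heappop(max_heap)
--
--         # 만약 현재 가장 큰 거인의 키가 센티보다 작다면 더 이상 마법을 사용할 필요가 없으므로 종료
--         if tallest < tall:
--             # 거인의 키가 모두 센티보다 작아졌으므로 YES를 출력하고, 사용한 마법 횟수를 반환
--             return "YES", used_hammer
--
--         # 거인의 키가 1이면 더 이상 줄일 수 없으므로 종료
--         if tallest == 1:
--             # 힙에 1을 다시 넣지 않음
--             heapq.heappush(max_heap, -1)
--             continue
--
--         # 거인의 키를 절반으로 줄임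
--         new_height = tallest // 2
--         # 줄어든 키가 1 이상인 경우에만 힙에 다시 삽입
--         if new_height > 1:
--             heapq.heappush(max_heap, -new_height)
--         else:
--             # 줄어든 키가 1이면 힙에 1을 다시 넣음
--             heapq.heappush(max_heap, -1)
--
--         # 마법의 뿅망치를 사용했으므로 횟수 증가
--         used_hammer += 1
--
--     # T번의 뿅망치를 모두 사용한 후에도 가장 큰 거인의 키가 센티보다 크거나 같으면 NO를 출력
--     if -max_heap[0] >= tall:
--         # NO와 함께 현재 거인 중 키가 가장 큰 값을 출력
--         return "NO", -max_heap[0]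
--     else:
--         # 만약 모든 거인의 키가 센티보다 작다면 YES를 출력하고, 사용한 마법 횟수를 반환
--         return "YES", used_hammer
-- ===== SOURCE B (Python) =====
-- import heapq
--
-- def giant_hammer(N, tall, T, li):
--     # Bucket re-implementation: count giants per height once, keep one heap entry
--     # per DISTINCT height, and shrink the whole bucket of equal tallest giants in
--     # one arithmetic step, consuming min(bucket size, remaining budget) hammer
--     # uses at once; the loop runs once per distinct height level.
--     cnt = {}
--     for h in li:
--         cnt[h] = cnt.get(h, 0) + 1
--     hp = [-v for v in cnt]
--     heapq.heapify(hp)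
--     used = 0
--     budget = T if T > 0 else 0
--     while True:
--         v = -hp[0]
--         c = cnt[v]
--         if v < tall:
--             return "YES", used
--         if budget == 0:
--             return "NO", v
--         if v == 1:
--             return "NO", 1
--         k = c if c < budget else budget
--         s = v // 2
--         if s < 1:
--             s = 1
--         if k < c:
--             cnt[v] = c - k
--         else:
--             del cnt[v]
--             heapq.heappop(hp)
--         if s in cnt:
--             cnt[s] = cnt[s] + k
--         else:
--             cnt[s] = k
--             heapq.heappush(hp, -s)
--         used += k
--         budget -= k
-- ===== Notes on version B (the rewrite author's own statement) =====
-- stated objective: alternative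
-- what changed: A pops one giant at a time from a heap of all N giants and halves it, looping up to T times; B counts giants per height into a dict, keeps one heap entry per DISTINCT height, and shrinks the whole bucket of equal tallest giants in one arithmetic step, consuming min(bucket size, remaining budget) hammer uses at once, so its loop runs once per distinct height level instead of once per hammer use.
import Mathlib
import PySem

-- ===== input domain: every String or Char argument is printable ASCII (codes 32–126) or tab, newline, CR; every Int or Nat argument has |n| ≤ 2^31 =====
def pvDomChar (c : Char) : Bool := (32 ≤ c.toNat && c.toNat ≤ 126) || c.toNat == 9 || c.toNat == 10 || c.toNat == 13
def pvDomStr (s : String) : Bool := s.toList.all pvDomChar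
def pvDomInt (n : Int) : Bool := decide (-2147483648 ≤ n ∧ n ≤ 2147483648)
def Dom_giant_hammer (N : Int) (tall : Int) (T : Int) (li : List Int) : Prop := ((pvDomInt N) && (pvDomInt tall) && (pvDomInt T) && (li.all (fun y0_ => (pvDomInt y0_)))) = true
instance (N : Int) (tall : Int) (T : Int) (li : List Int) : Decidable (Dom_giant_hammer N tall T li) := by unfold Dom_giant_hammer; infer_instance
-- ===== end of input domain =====

-- B replaces A's one-giant-at-a-time heap simulation by per-height bucket counts
-- with one heap entry per distinct height, shrinking the whole tallest bucket in
-- one arithmetic step (objective: alternative algorithm; the equivalence of the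
-- return value on every nonempty list is proved below).

-- ===== PORT A =====
-- heapq is modelled by its observable contract: the heap is kept as the ascending
-- sorted list of its elements (heapify = sort, heappop = take the minimum = head,
-- heappush = ordered insert, max_heap[0] = head).  A observes the heap only through
-- heappop / heappush / [0], so this model is exact for A.
def ghPush (x : Int) : List Int → List Int
  | [] => [x]
  | y :: t => if x ≤ y then x :: y :: t else y :: ghPush x t

-- the 'for _ in range(T)' loop of A (fuel = iterations left), with A's post-loop
-- check placed at fuel 0
def ghRun (tall : Int) : Nat → List Int → Int → String × Int
  | 0, heap, used =>
      match heap with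
      | [] => ("", 0)        -- Python raises IndexError on max_heap[0]; excluded by Pre_
      | h :: _ => if -h ≥ tall then ("NO", -h) else ("YES", used)
  | f+1, heap, used =>
      match heap with
      | [] => ("", 0)        -- Python raises IndexError on heappop; excluded by Pre_
      | h :: rest =>
          if -h < tall then ("YES", used)
          else if -h = 1 then ghRun tall f (ghPush (-1) rest) used
          else if PySem.Int.floordiv (-h) 2 > 1 then
            ghRun tall f (ghPush (-(PySem.Int.floordiv (-h) 2)) rest) (used + 1)
          else ghRun tall f (ghPush (-1) rest) (used + 1)

def giant_hammer (N : Int) (tall : Int) (T : Int) (li : List Int) : String × Int :=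
  ghRun tall T.toNat (PySem.List.sorted (li.map (fun h => -h)) (fun x => x) false) 0

-- ===== PORT B =====
-- cnt = {}; for h in li: cnt[h] = cnt.get(h, 0) + 1
def bCount (li : List Int) : PySem.Dict Int Int :=
  li.foldl (fun d h => d.insert h (d.getD h 0 + 1)) PySem.Dict.empty

-- the 'while True' loop of Source B.  Every iteration that does not return consumes at
-- least 1 of budget, so budget + 1 iterations suffice: fuel = budget + 1 at entry.
-- Source B's heap hp (one entry per distinct height, negated) is modelled like A's:
-- the ascending sorted list (heapify = sort, hp[0] = head, heappop = drop the
-- head, heappush = ordered insert); Source B observes it only through those.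
def bLoop (tall : Int) : Nat → List Int → PySem.Dict Int Int → Int → Int → String × Int
  | 0, _, _, _, _ => ("", 0)    -- unreachable: fuel > budget bounds the iteration count
  | f+1, hp, cnt, used, budget =>
      match hp with
      | [] => ("", 0)           -- Python: hp[0] raises IndexError; unreachable under Pre_
      | h0 :: hpt =>
        let v := -h0
        let c := cnt.getD v 0   -- c = cnt[v]; exact: v is a key of cnt
        if v < tall then ("YES", used)
        else if budget = 0 then ("NO", v)
        else if v = 1 then ("NO", 1)
        else
          let k := if c < budget then c else budget
          let s0 := PySem.Int.floordiv v 2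
          let s := if s0 < 1 then 1 else s0
          let cnt' := if k < c then cnt.insert v (c - k) else cnt.erase v
          let hp' := if k < c then h0 :: hpt else hpt
          let cnt'' := if cnt'.contains s = true then cnt'.insert s (cnt'.getD s 0 + k)
            else cnt'.insert s k
          let hp'' := if cnt'.contains s = true then hp' else ghPush (-s) hp'
          bLoop tall f hp'' cnt'' (used + k) (budget - k)

def giant_hammer_alt (N : Int) (tall : Int) (T : Int) (li : List Int) : String × Int :=
  bLoop tall ((if T > 0 then T else 0).toNat + 1)
    (PySem.List.sorted ((bCount li).keys.map (fun v => -v)) (fun x => x) false)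
    (bCount li) 0 (if T > 0 then T else 0)

-- ===== PRECONDITION & SPEC =====
-- Pre_ excludes only the empty list, on which Python A raises IndexError
-- (heappop / max_heap[0] on an empty heap).
def Pre_giant_hammer (N : Int) (tall : Int) (T : Int) (li : List Int) : Prop := li ≠ []
instance (N : Int) (tall : Int) (T : Int) (li : List Int) : Decidable (Pre_giant_hammer N tall T li) := by unfold Pre_giant_hammer; infer_instance
def pvWitness_giant_hammer : Int × Int × Int × List Int := (3, 2, 4, [5, 3, 5])

def Spec_giant_hammer (N : Int) (tall : Int) (T : Int) (li : List Int) (out : String × Int) : Prop := out = giant_hammer_alt N tall T li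
instance (N : Int) (tall : Int) (T : Int) (li : List Int) (out : String × Int) : Decidable (Spec_giant_hammer N tall T li out) := by unfold Spec_giant_hammer; infer_instance

-- ===== CLAIM (what is proved, stated in full; the proofs are below) =====
def Claim_equal_giant_hammer : Prop := ∀ (N : Int) (tall : Int) (T : Int) (li : List Int), Dom_giant_hammer N tall T li → Pre_giant_hammer N tall T li → Spec_giant_hammer N tall T li (giant_hammer N tall T li)

-- ===== LEMMAS AND PROOFS =====

-- j-fold ghPush of the same value (the shape A's heap takes during a bulk step)
def pushN (x : Int) : Nat → List Int → List Int
  | 0, r => r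
  | j+1, r => pushN x j (ghPush x r)

lemma count_ghPush (x : Int) (l : List Int) (y : Int) :
    (ghPush x l).count y = (x :: l).count y := by
  induction l with
  | nil => rfl
  | cons a t ih =>
      simp only [ghPush]
      split
      · rfl
      · simp [List.count_cons, ih, List.count_cons]; ring

lemma mem_ghPush {y x : Int} {l : List Int} : y ∈ ghPush x l ↔ y = x ∨ y ∈ l := by
  induction l with
  | nil => simp [ghPush]
  | cons a t ih =>
      simp only [ghPush]
      split
      · simp
      · simp [ih]; tauto

lemma ghPush_of_le {x : Int} {l : List Int} (h : ∀ y ∈ l, x ≤ y) :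
    ghPush x l = x :: l := by
  cases l with
  | nil => rfl
  | cons a t => simp [ghPush, h a (by simp)]

lemma sorted_ghPush {x : Int} {l : List Int} (hs : l.Pairwise (· ≤ ·)) :
    (ghPush x l).Pairwise (· ≤ ·) := by
  induction l with
  | nil => simp [ghPush]
  | cons a t ih =>
      simp only [ghPush]
      split
      · refine List.pairwise_cons.mpr ⟨?_, hs⟩
        intro b hb
        rcases List.mem_cons.mp hb with rfl | hb
        · omega
        · exact le_trans (by omega) ((List.pairwise_cons.mp hs).1 b hb)
      · have hst := List.pairwise_cons.mp hs
        refine List.pairwise_cons.mpr ⟨?_, ih hst.2⟩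
        intro b hb
        rcases mem_ghPush.mp hb with rfl | hb
        · omega
        · exact hst.1 b hb

lemma ghPush_replicate_append {a x : Int} (h : a < x) (m : Nat) (r : List Int) :
    ghPush x (List.replicate m a ++ r) = List.replicate m a ++ ghPush x r := by
  induction m with
  | zero => simp
  | succ n ih =>
      simp only [List.replicate_succ, List.cons_append, ghPush]
      rw [if_neg (by omega), ih]

lemma count_pushN (x : Int) (j : Nat) (r : List Int) (y : Int) :
    (pushN x j r).count y = (if y = x then j else 0) + r.count y := by
  induction j generalizing r with
  | zero => simp [pushN]
  | succ n ih =>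
      simp only [pushN, ih, count_ghPush, List.count_cons]
      split <;> simp_all <;> omega

lemma mem_pushN {y x : Int} {j : Nat} {r : List Int} (h : y ∈ pushN x j r) :
    y = x ∨ y ∈ r := by
  induction j generalizing r with
  | zero => exact Or.inr h
  | succ n ih =>
      rcases ih h with h | h
      · exact Or.inl h
      · exact mem_ghPush.mp h

lemma sorted_pushN {x : Int} {j : Nat} {r : List Int} (hs : r.Pairwise (· ≤ ·)) :
    (pushN x j r).Pairwise (· ≤ ·) := by
  induction j generalizing r with
  | zero => exact hs
  | succ n ih => exact ih (sorted_ghPush hs)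

-- a sorted list whose elements are all ≥ m splits as the block of copies of m
-- followed by the strictly larger tail
lemma sorted_min_decomp (l : List Int) (m : Int) (hs : l.Pairwise (· ≤ ·))
    (hmin : ∀ y ∈ l, m ≤ y) :
    ∃ rest, l = List.replicate (l.count m) m ++ rest ∧ rest.Pairwise (· ≤ ·) ∧
      ∀ y ∈ rest, m < y := by
  induction l with
  | nil => exact ⟨[], by simp⟩
  | cons a t ih =>
      have hst := List.pairwise_cons.mp hs
      by_cases ha : a = m
      · subst ha
        obtain ⟨rest, h1, h2, h3⟩ := ih hst.2 (fun y hy => hmin y (by simp [hy]))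
        refine ⟨rest, ?_, h2, h3⟩
        rw [List.count_cons_self, List.replicate_succ, List.cons_append]
        exact congrArg (a :: ·) h1
      · have hma : m < a := lt_of_le_of_ne (hmin a (by simp)) (Ne.symm ha)
        have hcount : (a :: t).count m = 0 := by
          simp only [List.count_eq_zero]
          intro hmem
          rcases List.mem_cons.mp hmem with h | h
          · omega
          · exact absurd (hst.1 m h) (by omega)
        refine ⟨a :: t, by simp [hcount], hs, ?_⟩
        intro y hy
        rcases List.mem_cons.mp hy with h | h
        · omega
        · exact lt_of_lt_of_le hma (hst.1 y h)

lemma sorted_replicate_append {a : Int} {r : List Int} (m : Nat)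
    (hs : r.Pairwise (· ≤ ·)) (h : ∀ y ∈ r, a ≤ y) :
    (List.replicate m a ++ r).Pairwise (· ≤ ·) := by
  induction m with
  | zero => simpa using hs
  | succ n ih =>
      simp only [List.replicate_succ, List.cons_append]
      refine List.pairwise_cons.mpr ⟨?_, ih⟩
      intro b hb
      rcases List.mem_append.mp hb with hb | hb
      · simp_all [List.eq_of_mem_replicate hb]
      · exact h b hb

-- dict lemmas for erase (PySem.Dict.erase is a filter on the items list)
lemma dict_keys_erase (d : PySem.Dict Int Int) (k : Int) :
    (d.erase k).keys = d.keys.filter (fun u => u ≠ k) := by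
  simp [PySem.Dict.erase, PySem.Dict.keys, List.filter_map]
  rfl

lemma find?_filter_ne (t : List (Int × Int)) (k u : Int) (h : u ≠ k) :
    (t.filter (fun p => !p.1 == k)).find? (fun p => p.1 == u)
      = t.find? (fun p => p.1 == u) := by
  induction t with
  | nil => rfl
  | cons p t ih =>
      by_cases hpk : p.1 = k
      · rw [List.filter_cons_of_neg (by simp [hpk]),
            List.find?_cons_of_neg (by simp [hpk]; omega), ih]
      · by_cases hpu : p.1 = u
        · rw [List.filter_cons_of_pos (by simp [hpk]),
              List.find?_cons_of_pos (by simp [hpu]), List.find?_cons_of_pos (by simp [hpu])]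
        · rw [List.filter_cons_of_pos (by simp [hpk]),
              List.find?_cons_of_neg (by simp [hpu]), List.find?_cons_of_neg (by simp [hpu]), ih]

lemma dict_getD_erase (d : PySem.Dict Int Int) (k u : Int) :
    (d.erase k).getD u 0 = if u = k then 0 else d.getD u 0 := by
  simp only [PySem.Dict.getD, PySem.Dict.get?, PySem.Dict.erase]
  by_cases h : u = k
  · subst h
    have hnone : (d.items.filter (fun p => !p.1 == u)).find? (fun p => p.1 == u) = none := by
      rw [List.find?_eq_none]
      intro p hp
      have := (List.mem_filter.mp hp).2
      simpa using this
    simp [hnone]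
  · rw [find?_filter_ne d.items k u h, if_neg h]

-- every stored count is nonnegative once all key counts are ≥ 1
lemma getD_nonneg_of_keys (cnt : PySem.Dict Int Int)
    (h : ∀ u ∈ cnt.keys, 1 ≤ cnt.getD u 0) (u : Int) : 0 ≤ cnt.getD u 0 := by
  by_cases hu : u ∈ cnt.keys
  · exact le_trans (by omega) (h u hu)
  · rw [PySem.Dict.getD_of_not_contains]
    rw [← Bool.not_eq_true, PySem.Dict.contains_iff_mem_keys]
    exact hu

-- once the maximum height is 1 and 1 is not below tall, A spins forever: NO, 1
lemma ghRun_spin (tall : Int) (htall : tall ≤ 1) :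
    ∀ (fuel : Nat) (l : List Int) (used : Int), (∀ y ∈ l, -1 ≤ y) →
      ghRun tall fuel (-1 :: l) used = ("NO", 1) := by
  intro fuel
  induction fuel with
  | zero => intro l used _; simp [ghRun]; omega
  | succ f ih =>
      intro l used hl
      simp only [ghRun]
      rw [if_neg (by omega), if_pos (by omega), ghPush_of_le hl]
      exact ih l used hl

-- bulk lemma: while the maximum value v ≥ 2 is on top with multiplicity ≥ j and
-- fuel ≥ j, A performs j identical pop/halve/push steps
lemma ghRun_bulk (tall v : Int) (hv : 2 ≤ v) (hnt : ¬ v < tall) :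
    ∀ (j mc fuel : Nat) (rest : List Int) (used : Int),
      j ≤ mc → j ≤ fuel → (∀ y ∈ rest, -v < y) →
      ghRun tall fuel (List.replicate mc (-v) ++ rest) used
        = ghRun tall (fuel - j)
            (List.replicate (mc - j) (-v) ++ pushN (-(PySem.Int.floordiv v 2)) j rest)
            (used + j) := by
  have hs1 : 1 ≤ PySem.Int.floordiv v 2 := by
    rw [PySem.Int.le_floordiv_iff_mul_le (by omega)]; omega
  have hslt : PySem.Int.floordiv v 2 < v := by
    rw [PySem.Int.floordiv_lt_iff_lt_mul (by omega)]; omega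
  intro j
  induction j with
  | zero => intro mc fuel rest used _ _ _; simp [pushN]
  | succ n ih =>
      intro mc fuel rest used hmc hfuel hrest
      obtain ⟨m, rfl⟩ : ∃ m, mc = m + 1 := ⟨mc - 1, by omega⟩
      obtain ⟨f, rfl⟩ : ∃ f, fuel = f + 1 := ⟨fuel - 1, by omega⟩
      have hstep : List.replicate (m+1) (-v) ++ rest
          = -v :: (List.replicate m (-v) ++ rest) := by
        simp [List.replicate_succ]
      rw [hstep]
      simp only [ghRun, neg_neg]
      rw [if_neg hnt, if_neg (by omega)]
      have hpush : ∀ z : Int, -v < -z →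
          ghPush (-z) (List.replicate m (-v) ++ rest)
            = List.replicate m (-v) ++ ghPush (-z) rest := fun z hz =>
        ghPush_replicate_append hz m rest
      have hrec : ghRun tall f
            (List.replicate m (-v) ++ ghPush (-(PySem.Int.floordiv v 2)) rest) (used + 1)
          = ghRun tall (f - n)
              (List.replicate (m - n) (-v)
                ++ pushN (-(PySem.Int.floordiv v 2)) n (ghPush (-(PySem.Int.floordiv v 2)) rest))
              (used + 1 + n) := by
        apply ih m f _ (used + 1) (by omega) (by omega)
        intro y hy
        rcases mem_ghPush.mp hy with rfl | hy
        · omega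
        · exact hrest y hy
      have harith : used + 1 + (n : Int) = used + ((n + 1 : Nat) : Int) := by push_cast; ring
      by_cases hb : PySem.Int.floordiv v 2 > 1
      · rw [if_pos hb, hpush _ (by omega)]
        rw [show (f+1) - (n+1) = f - n from by omega,
            show (m+1) - (n+1) = m - n from by omega]
        simp only [pushN]
        rw [show used + ((n+1 : Nat) : Int) = used + 1 + (n : Int) from by push_cast; ring]
        exact hrec
      · have hone : PySem.Int.floordiv v 2 = 1 := by omega
        rw [if_neg hb, show (-1 : Int) = -(PySem.Int.floordiv v 2) from by omega,
            hpush _ (by omega)]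
        rw [show (f+1) - (n+1) = f - n from by omega,
            show (m+1) - (n+1) = m - n from by omega]
        simp only [pushN]
        rw [show used + ((n+1 : Nat) : Int) = used + 1 + (n : Int) from by push_cast; ring]
        exact hrec

lemma ghPush_perm (x : Int) (l : List Int) : (ghPush x l).Perm (x :: l) := by
  induction l with
  | nil => rfl
  | cons a t ih =>
      simp only [ghPush]
      split
      · rfl
      · exact (ih.cons a).trans (List.Perm.swap x a t)

lemma nodup_ghPush {x : Int} {l : List Int} (hx : x ∉ l) (hl : l.Nodup) :
    (ghPush x l).Nodup := ((ghPush_perm x l).nodup_iff).mpr (by simp [hx, hl])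

lemma ghPush_ne_nil (x : Int) (l : List Int) : ghPush x l ≠ [] := by
  cases l with
  | nil => simp [ghPush]
  | cons a t => simp only [ghPush]; split <;> simp

-- one B iteration whose heap head is -1 (and 1 is not below tall) returns NO, 1
lemma bLoop_one (tall : Int) (f : Nat) (t : List Int) (cnt : PySem.Dict Int Int)
    (used budget : Int) (ht : ¬ (1 : Int) < tall) :
    bLoop tall (f+1) (-1 :: t) cnt used budget = ("NO", 1) := by
  rw [bLoop]
  simp only [neg_neg]
  rw [if_neg ht]
  by_cases hb : budget = 0
  · simp [hb]
  · simp [hb]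

-- the main simulation lemma-- the main simulation lemma: A's heap loop equals B's bucket loop whenever the
-- heap is the ascending sorted multiset described by the count dict
lemma main_sim (tall : Int) :
    ∀ (f : Nat) (hp : List Int) (cnt : PySem.Dict Int Int) (heap : List Int)
      (used budget : Int),
      0 ≤ budget → budget.toNat < f →
      heap.Pairwise (· ≤ ·) →
      (∀ x : Int, (heap.count x : Int) = cnt.getD (-x) 0) →
      (∀ u ∈ cnt.keys, 1 ≤ cnt.getD u 0) →
      hp.Pairwise (· ≤ ·) → hp.Nodup →
      (∀ x : Int, x ∈ hp ↔ -x ∈ cnt.keys) →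
      hp ≠ [] →
      ghRun tall budget.toNat heap used = bLoop tall f hp cnt used budget := by
  intro f
  induction f with
  | zero => intro hp cnt heap used budget h0 h1 _ _ _ _ _ _ _; omega
  | succ f ih =>
      intro hp cnt heap used budget hb0 hbf hsort hcount hkey hpsort hpnd hpmem hpne
      obtain ⟨h0, hpt, rfl⟩ : ∃ h0 hpt, hp = h0 :: hpt := by
        cases hp with
        | nil => exact absurd rfl hpne
        | cons a t => exact ⟨a, t, rfl⟩
      have hvmem : -h0 ∈ cnt.keys := (hpmem h0).mp (by simp)
      have hvmax : ∀ u ∈ cnt.keys, u ≤ -h0 := by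
        intro u hu
        have hmem : -u ∈ h0 :: hpt := (hpmem (-u)).mpr (by rwa [neg_neg])
        rcases List.mem_cons.mp hmem with h | h
        · omega
        · have := (List.pairwise_cons.mp hpsort).1 (-u) h
          omega
      -- abbreviate the maximum height
      set v := -h0 with hvdef
      have hge0 := getD_nonneg_of_keys cnt hkey
      have hc1 : 1 ≤ cnt.getD v 0 := hkey v hvmem
      have hmin : ∀ y ∈ heap, -v ≤ y := by
        intro y hy
        have hpos : 0 < heap.count y := List.count_pos_iff.mpr hy
        have hy1 : 1 ≤ cnt.getD (-y) 0 := by have := hcount y; omega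
        have hmem : -y ∈ cnt.keys := by
          by_contra hmemn
          have : cnt.getD (-y) 0 = 0 := PySem.Dict.getD_of_not_contains _ _ (by
            rw [← Bool.not_eq_true, PySem.Dict.contains_iff_mem_keys]; exact hmemn)
          omega
        have := hvmax _ hmem; omega
      obtain ⟨rest, hdecomp, hrsort, hrgt⟩ := sorted_min_decomp heap (-v) hsort hmin
      have hcv : (heap.count (-v) : Int) = cnt.getD v 0 := by
        have := hcount (-v); simpa using this
      have hrest_count : ∀ y, y ≠ -v → rest.count y = heap.count y := by
        intro y hy
        rw [hdecomp, List.count_append, List.count_replicate]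
        simp [Ne.symm hy]
      have hrest_v : rest.count (-v) = 0 :=
        List.count_eq_zero.mpr (fun h => absurd (hrgt _ h) (by omega))
      obtain ⟨n, hn⟩ : ∃ n, heap.count (-v) = n + 1 := ⟨heap.count (-v) - 1, by omega⟩
      have hshape : heap = -v :: (List.replicate n (-v) ++ rest) := by
        rw [hdecomp, hn, List.replicate_succ, List.cons_append]
      by_cases h1 : v < tall
      · -- YES branch
        rw [bLoop]
        simp only [← hvdef, if_pos h1]
        cases hbt : budget.toNat with
        | zero => rw [hshape]; simp only [ghRun, neg_neg]; rw [if_neg (by omega)]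
        | succ fb => rw [hshape]; simp only [ghRun, neg_neg]; rw [if_pos h1]
      · by_cases h2 : budget = 0
        · -- out of budget: NO with the current maximum
          rw [bLoop]
          simp only [← hvdef, if_neg h1, if_pos h2]
          have hbt : budget.toNat = 0 := by omega
          rw [hbt, hshape]
          simp only [ghRun, neg_neg]
          rw [if_pos (by omega)]
        · by_cases h3 : v = 1
          · -- spin: maximum is 1 and 1 ≥ tall
            rw [bLoop]
            simp only [← hvdef, if_neg h1, if_neg h2, if_pos h3]
            rw [hshape, show (-v : Int) = -1 from by omega]
            apply ghRun_spin tall (by omega)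
            intro y hy
            rcases List.mem_append.mp hy with hy | hy
            · have := List.eq_of_mem_replicate hy; omega
            · have := hrgt y hy; omega
          · -- halving step(s)
            have hb1 : 1 ≤ budget := by omega
            have hk1 : 1 ≤ (if cnt.getD v 0 < budget then cnt.getD v 0 else budget) := by
              split <;> omega
            have hkc : (if cnt.getD v 0 < budget then cnt.getD v 0 else budget) ≤ cnt.getD v 0 := by
              split <;> omega
            have hkb : (if cnt.getD v 0 < budget then cnt.getD v 0 else budget) ≤ budget := by
              split <;> omega
            set k := if cnt.getD v 0 < budget then cnt.getD v 0 else budget with hkdef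
            set cntP := if k < cnt.getD v 0 then cnt.insert v (cnt.getD v 0 - k)
              else cnt.erase v with hcntPdef
            set hpP : List Int := if k < cnt.getD v 0 then h0 :: hpt else hpt with hpPdef
            have hcntP : ∀ u, cntP.getD u 0 = if u = v then cnt.getD v 0 - k else cnt.getD u 0 := by
              intro u
              rw [hcntPdef]
              by_cases hklt : k < cnt.getD v 0
              · rw [if_pos hklt, PySem.Dict.getD_insert]
              · rw [if_neg hklt, dict_getD_erase]
                have hkec : k = cnt.getD v 0 := by omega
                split <;> omega
            have hkeysP : ∀ u ∈ cntP.keys, u ∈ cnt.keys ∨ u = v := by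
              intro u hu
              rw [hcntPdef] at hu
              by_cases hklt : k < cnt.getD v 0
              · rw [if_pos hklt] at hu
                rcases (PySem.Dict.mem_keys_insert _ _ _ _).mp hu with h | h
                · exact Or.inr h
                · exact Or.inl h
              · rw [if_neg hklt, dict_keys_erase] at hu
                exact Or.inl (List.mem_filter.mp hu).1
            have hkeysPv : k = cnt.getD v 0 → v ∉ cntP.keys := by
              intro hkec hmem
              rw [hcntPdef, if_neg (by omega), dict_keys_erase] at hmem
              have := (List.mem_filter.mp hmem).2
              simp at this
            have hmemP : ∀ x, x ∈ hpP ↔ -x ∈ cntP.keys := by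
              intro x
              rw [hpPdef, hcntPdef]
              by_cases hklt : k < cnt.getD v 0
              · rw [if_pos hklt, if_pos hklt]
                rw [PySem.Dict.mem_keys_insert]
                constructor
                · intro hx; exact Or.inr ((hpmem x).mp hx)
                · intro hx
                  rcases hx with hx | hx
                  · exact (hpmem x).mpr (hx ▸ hvmem)
                  · exact (hpmem x).mpr hx
              · rw [if_neg hklt, if_neg hklt, dict_keys_erase, List.mem_filter]
                constructor
                · intro hx
                  refine ⟨(hpmem x).mp (by simp [hx]), ?_⟩
                  have hx0 : x ≠ h0 := fun h => (List.nodup_cons.mp hpnd).1 (h ▸ hx)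
                  simp only [decide_eq_true_eq]
                  omega
                · intro ⟨hx1, hx2⟩
                  simp only [decide_eq_true_eq] at hx2
                  rcases List.mem_cons.mp ((hpmem x).mpr hx1) with h | h
                  · exfalso; apply hx2; omega
                  · exact h
            have hsortP : hpP.Pairwise (· ≤ ·) := by
              rw [hpPdef]
              split
              · exact hpsort
              · exact (List.pairwise_cons.mp hpsort).2
            have hndP : hpP.Nodup := by
              rw [hpPdef]
              split
              · exact hpnd
              · exact (List.nodup_cons.mp hpnd).2
            by_cases hvle : v ≤ 0
            · -- non-positive maximum: one "halving" clamps the giant to height 1, then NO, 1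
              have htv : tall ≤ v := by omega
              obtain ⟨fb, hfb⟩ : ∃ fb, budget.toNat = fb + 1 := ⟨budget.toNat - 1, by omega⟩
              have hflt : PySem.Int.floordiv v 2 < 1 := by
                rw [PySem.Int.floordiv_lt_iff_lt_mul (by omega)]; omega
              have hA : ghRun tall budget.toNat heap used = ("NO", 1) := by
                rw [hfb, hshape]
                simp only [ghRun, neg_neg]
                rw [if_neg h1, if_neg h3, if_neg (by omega)]
                rw [ghPush_of_le (by
                  intro y hy
                  rcases List.mem_append.mp hy with hy | hy
                  · have := List.eq_of_mem_replicate hy; omega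
                  · have := hrgt y hy; omega)]
                apply ghRun_spin tall (by omega)
                intro y hy
                rcases List.mem_append.mp hy with hy | hy
                · have := List.eq_of_mem_replicate hy; omega
                · have := hrgt y hy; omega
              have hno1 : (1 : Int) ∉ cntP.keys := by
                intro hmem
                rcases hkeysP 1 hmem with h | h
                · have := hvmax 1 h; omega
                · omega
              have hcontf : cntP.contains 1 = false := by
                rw [← Bool.not_eq_true, PySem.Dict.contains_iff_mem_keys]; exact hno1
              rw [hA, bLoop]
              simp only [← hvdef, if_neg h1, if_neg h2, if_neg h3, ← hkdef, ← hcntPdef, ← hpPdef]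
              rw [if_pos hflt]
              simp only [hcontf, Bool.false_eq_true, if_false]
              rw [ghPush_of_le (by
                intro y hy
                have := hkeysP (-y) ((hmemP y).mp hy)
                rcases this with h | h
                · have := hvmax (-y) h; omega
                · omega)]
              obtain ⟨f', hf'⟩ : ∃ f', f = f' + 1 := ⟨f - 1, by omega⟩
              rw [hf']
              exact (bLoop_one tall f' hpP _ _ _ (by omega)).symm
            · -- v ≥ 2: bulk halving of the whole top bucket
              have hv2 : 2 ≤ v := by omega
              have hs1 : 1 ≤ PySem.Int.floordiv v 2 := by
                rw [PySem.Int.le_floordiv_iff_mul_le (by omega)]; omega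
              have hslt : PySem.Int.floordiv v 2 < v := by
                rw [PySem.Int.floordiv_lt_iff_lt_mul (by omega)]; omega
              have hsv : PySem.Int.floordiv v 2 ≠ v := by omega
              have hbulk := ghRun_bulk tall v hv2 h1 k.toNat (heap.count (-v)) budget.toNat
                rest used (by omega) (by omega) hrgt
              rw [← hdecomp] at hbulk
              rw [hbulk, bLoop]
              simp only [← hvdef, if_neg h1, if_neg h2, if_neg h3, ← hkdef, ← hcntPdef, ← hpPdef]
              rw [if_neg (show ¬ PySem.Int.floordiv v 2 < 1 by omega)]
              have htk : ((k.toNat : Nat) : Int) = k := Int.toNat_of_nonneg (by omega)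
              rw [show budget.toNat - k.toNat = (budget - k).toNat from by omega, htk]
              -- the updated dict: one uniform description for both contains-branches
              have hcnt2 : ∀ u, (if cntP.contains (PySem.Int.floordiv v 2) = true then
                  cntP.insert (PySem.Int.floordiv v 2) (cntP.getD (PySem.Int.floordiv v 2) 0 + k)
                  else cntP.insert (PySem.Int.floordiv v 2) k).getD u 0
                  = if u = PySem.Int.floordiv v 2 then cntP.getD (PySem.Int.floordiv v 2) 0 + k
                    else cntP.getD u 0 := by
                intro u
                by_cases hcont : cntP.contains (PySem.Int.floordiv v 2) = true
                · rw [if_pos hcont, PySem.Dict.getD_insert]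
                · rw [if_neg hcont, PySem.Dict.getD_insert]
                  have hz : cntP.getD (PySem.Int.floordiv v 2) 0 = 0 :=
                    PySem.Dict.getD_of_not_contains _ _ (by simpa using hcont)
                  split <;> omega
              have hkeys2 : ∀ u, u ∈ (if cntP.contains (PySem.Int.floordiv v 2) = true then
                  cntP.insert (PySem.Int.floordiv v 2) (cntP.getD (PySem.Int.floordiv v 2) 0 + k)
                  else cntP.insert (PySem.Int.floordiv v 2) k).keys
                  ↔ u = PySem.Int.floordiv v 2 ∨ u ∈ cntP.keys := by
                intro u
                by_cases hcont : cntP.contains (PySem.Int.floordiv v 2) = true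
                · rw [if_pos hcont]; exact PySem.Dict.mem_keys_insert _ _ _ _
                · rw [if_neg hcont]; exact PySem.Dict.mem_keys_insert _ _ _ _
              apply ih
              · omega
              · omega
              · apply sorted_replicate_append _ (sorted_pushN hrsort)
                intro y hy
                rcases mem_pushN hy with rfl | hy
                · omega
                · have := hrgt y hy; omega
              · intro x
                simp only [List.count_append, List.count_replicate, count_pushN, hcnt2]
                simp only [hcntP, beq_iff_eq]
                by_cases hxv : x = -v
                · subst hxv
                  simp only [hrest_v, if_true,
                    if_neg (show ¬(-v = -PySem.Int.floordiv v 2) from by omega),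
                    if_neg hsv]
                  omega
                · by_cases hxs : x = -(PySem.Int.floordiv v 2)
                  · subst hxs
                    have hx := hcount (-(PySem.Int.floordiv v 2))
                    rw [neg_neg] at hx
                    simp only [neg_neg, if_neg hsv, if_true,
                      if_neg (show ¬(-v = -PySem.Int.floordiv v 2) from by omega),
                      hrest_count _ (show -(PySem.Int.floordiv v 2) ≠ -v from by omega)]
                    omega
                  · have hx := hcount x
                    simp only [if_neg (show ¬(-v = x) from fun h => hxv (by omega)),
                      if_neg hxs,
                      if_neg (show ¬(-x = PySem.Int.floordiv v 2) from fun h => hxs (by omega)),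
                      if_neg (show ¬(-x = v) from fun h => hxv (by omega)),
                      hrest_count _ hxv]
                    omega
              · intro u hu
                simp only [hcnt2]
                simp only [hcntP]
                rcases (hkeys2 u).mp hu with h | h
                · subst h
                  rw [if_pos rfl, if_neg hsv]
                  have := hge0 (PySem.Int.floordiv v 2)
                  omega
                · by_cases hus : u = PySem.Int.floordiv v 2
                  · rw [if_pos hus, if_neg hsv]
                    have := hge0 (PySem.Int.floordiv v 2)
                    omega
                  · rw [if_neg hus]
                    rcases hkeysP u h with h' | h'
                    · by_cases huv : u = v
                      · rw [if_pos huv]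
                        by_cases hklt : k < cnt.getD v 0
                        · omega
                        · exact absurd (huv ▸ h) (hkeysPv (by omega))
                      · rw [if_neg huv]; exact hkey u h'
                    · rw [if_pos h']
                      by_cases hklt : k < cnt.getD v 0
                      · omega
                      · exact absurd (h' ▸ h) (hkeysPv (by omega))
              · -- hp'' sorted
                by_cases hcont : cntP.contains (PySem.Int.floordiv v 2) = true
                · simp only [hcont, if_true]; exact hsortP
                · simp only [hcont, Bool.false_eq_true, if_false]
                  exact sorted_ghPush hsortP
              · -- hp'' nodup
                by_cases hcont : cntP.contains (PySem.Int.floordiv v 2) = true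
                · simp only [hcont, if_true]; exact hndP
                · simp only [hcont, Bool.false_eq_true, if_false]
                  apply nodup_ghPush _ hndP
                  intro hmem
                  have : PySem.Int.floordiv v 2 ∈ cntP.keys := by
                    have := (hmemP _).mp hmem
                    rwa [neg_neg] at this
                  rw [← PySem.Dict.contains_iff_mem_keys] at this
                  rw [this] at hcont
                  exact hcont rfl
              · -- hp'' membership
                intro x
                rw [hkeys2]
                by_cases hcont : cntP.contains (PySem.Int.floordiv v 2) = true
                · simp only [hcont, if_true]
                  rw [hmemP]
                  constructor
                  · intro hx; exact Or.inr hx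
                  · intro hx
                    rcases hx with hx | hx
                    · rw [hx]; exact (PySem.Dict.contains_iff_mem_keys _ _).mp hcont
                    · exact hx
                · simp only [hcont, Bool.false_eq_true, if_false, mem_ghPush, hmemP]
                  constructor
                  · intro hx
                    rcases hx with hx | hx
                    · exact Or.inl (by omega)
                    · exact Or.inr hx
                  · intro hx
                    rcases hx with hx | hx
                    · exact Or.inl (by omega)
                    · exact Or.inr hx
              · -- hp'' nonempty
                by_cases hcont : cntP.contains (PySem.Int.floordiv v 2) = true
                · simp only [hcont, if_true]
                  exact List.ne_nil_of_mem ((hmemP (-(PySem.Int.floordiv v 2))).mpr (by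
                    rw [neg_neg]
                    exact (PySem.Dict.contains_iff_mem_keys _ _).mp hcont))
                · simp only [hcont, Bool.false_eq_true, if_false]
                  exact ghPush_ne_nil _ _

theorem giant_hammer_spec : Claim_equal_giant_hammer := by
  intro N tall T li _ hpre
  replace hpre : li ≠ [] := hpre
  show giant_hammer N tall T li = giant_hammer_alt N tall T li
  unfold giant_hammer giant_hammer_alt bCount
  rw [PySem.Dict.foldl_insert_getD_add_one_eq_counter,
      show T.toNat = (if T > 0 then T else 0).toNat from by split <;> omega]
  have hinj : Function.Injective (fun h : Int => -h) := fun a b hab => by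
    simpa using congrArg Neg.neg hab
  have hknd : (PySem.Dict.counter li).keys.Nodup := by
    rw [PySem.Dict.keys_counter]; exact PySem.Set.nodup_ofList li
  apply main_sim
  · split <;> omega
  · omega
  · exact PySem.List.sorted_pairwise (li.map (fun h => -h)) (fun x => x)
  · intro x
    rw [(PySem.List.sorted_perm (li.map (fun h => -h)) (fun x => x) false).count_eq,
        PySem.Dict.getD_counter]
    have := List.count_map_of_injective li (fun h : Int => -h) hinj (-x)
    simp only [neg_neg] at this
    rw [this]
  · intro u hu
    rw [PySem.Dict.getD_counter]
    rw [PySem.Dict.keys_counter] at hu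
    have : u ∈ li := (PySem.Set.mem_ofList li u).mp hu
    have := List.count_pos_iff.mpr this
    omega
  · exact PySem.List.sorted_pairwise _ (fun x => x)
  · rw [(PySem.List.sorted_perm _ (fun x => x) false).nodup_iff]
    exact hknd.map hinj
  · intro x
    rw [(PySem.List.sorted_perm _ (fun x => x) false).mem_iff, List.mem_map]
    constructor
    · rintro ⟨u, hu, rfl⟩; simpa using hu
    · intro hx; exact ⟨-x, hx, by simp⟩
  · obtain ⟨a, ha⟩ : ∃ a, a ∈ li := by
      cases li with
      | nil => exact absurd rfl hpre
      | cons a t => exact ⟨a, by simp⟩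
    apply List.ne_nil_of_mem (a := -a)
    rw [(PySem.List.sorted_perm _ (fun x => x) false).mem_iff]
    apply List.mem_map_of_mem
    rw [PySem.Dict.keys_counter]
    exact (PySem.Set.mem_ofList li a).mpr ha
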